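-- pv_equiv track=rewrite | github.com/RemedyTwo/ace-attorney-sprite-reader | characters/Maya.py | get_yes
-- ===== SOURCE A (Python) =====
-- def get_yes(length: int, eyes: bool = True, mouth: bool = False) -> list[str]:
--     image_sequence = []
--     mouth_counter = 0
--     eye_counter = 0
--     for i in range(length):
--         current_frame = ["main", "sleeve", "bottom"]
--         if mouth:
--             if mouth_counter < 8:
--                 pass
--             elif mouth_counter < 17:
--                 current_frame.append("mouth1")
--             elif mouth_counter < 26:
--                 current_frame.append("mouth2")
--             elif mouth_counter < 35:
--                 current_frame.append("mouth1")
--             mouth_counter += 1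
--             if mouth_counter > 35:
--                 mouth_counter = 0
--         if eyes:
--             if eye_counter < 72:
--                 pass
--             elif eye_counter < 78:
--                 current_frame.append("eyes1")
--             elif eye_counter < 84:
--                 current_frame.append("eyes2")
--             elif eye_counter < 90:
--                 current_frame.append("eyes1")
--             eye_counter += 1
--             if eye_counter > 90:
--                 eye_counter = 0
--         image_sequence.append(tuple(current_frame)) # turning into tuple so they can be used as key later
--     return image_sequence
-- ===== SOURCE B (Python) =====
-- def get_yes(length: int, eyes: bool = True, mouth: bool = False) -> list[str]:
--     mouth_pat = [()] * 8 + [("mouth1",)] * 9 + [("mouth2",)] * 9 + [("mouth1",)] * 9 + [()]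
--     eye_pat = [()] * 72 + [("eyes1",)] * 6 + [("eyes2",)] * 6 + [("eyes1",)] * 6 + [()]
--     base = ("main", "sleeve", "bottom")
--     return [base + (mouth_pat[i % 36] if mouth else ()) + (eye_pat[i % 91] if eyes else ())
--             for i in range(length)]
-- ===== Notes on version B (the rewrite author's own statement) =====
-- stated objective: idiomatic
-- what changed: Replaces the threaded, branch-resetting mouth/eye counters with two precomputed period tables (length 36 and 91) indexed by i mod the period inside a single list comprehension.
import Mathlib
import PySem

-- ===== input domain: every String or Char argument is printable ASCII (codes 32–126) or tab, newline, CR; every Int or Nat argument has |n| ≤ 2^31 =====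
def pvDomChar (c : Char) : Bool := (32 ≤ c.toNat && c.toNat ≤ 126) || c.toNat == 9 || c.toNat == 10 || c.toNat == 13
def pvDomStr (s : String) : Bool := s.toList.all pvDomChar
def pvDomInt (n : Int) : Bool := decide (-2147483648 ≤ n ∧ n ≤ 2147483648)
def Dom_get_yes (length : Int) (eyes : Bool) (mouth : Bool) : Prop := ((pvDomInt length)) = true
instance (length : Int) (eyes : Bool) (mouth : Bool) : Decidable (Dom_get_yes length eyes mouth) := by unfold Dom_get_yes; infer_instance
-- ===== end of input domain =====

-- B replaces A's threaded resetting counters with modular indexing into two precomputed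
-- period tables and a single comprehension (objective: idiomatic/alternative; same O(n)).

-- ===== PORT A =====
-- A's for-loop as structural recursion over the remaining frame count, threading the
-- two counters exactly as the Python does (counters are ints that stay ≥ 0, kept as Nat).
def get_yes_loop (eyes mouth : Bool) : Nat → Nat → Nat → List (List String)
  | 0, _, _ => []
  | n + 1, mouth_counter, eye_counter =>
    let cf0 : List String := ["main", "sleeve", "bottom"]
    let cf1 : List String :=
      if mouth then
        cf0 ++ (if mouth_counter < 8 then []
                else if mouth_counter < 17 then ["mouth1"]
                else if mouth_counter < 26 then ["mouth2"]
                else if mouth_counter < 35 then ["mouth1"]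
                else [])
      else cf0
    let mc' : Nat := if mouth then (if mouth_counter + 1 > 35 then 0 else mouth_counter + 1) else mouth_counter
    let cf2 : List String :=
      if eyes then
        cf1 ++ (if eye_counter < 72 then []
                else if eye_counter < 78 then ["eyes1"]
                else if eye_counter < 84 then ["eyes2"]
                else if eye_counter < 90 then ["eyes1"]
                else [])
      else cf1
    let ec' : Nat := if eyes then (if eye_counter + 1 > 90 then 0 else eye_counter + 1) else eye_counter
    cf2 :: get_yes_loop eyes mouth n mc' ec'

def get_yes (length : Int) (eyes : Bool) (mouth : Bool) : List (List String) :=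
  get_yes_loop eyes mouth length.toNat 0 0

-- ===== PORT B =====
def mouthPat : List (List String) :=
  List.replicate 8 [] ++ List.replicate 9 ["mouth1"] ++ List.replicate 9 ["mouth2"] ++ List.replicate 9 ["mouth1"] ++ [[]]

def eyePat : List (List String) :=
  List.replicate 72 [] ++ List.replicate 6 ["eyes1"] ++ List.replicate 6 ["eyes2"] ++ List.replicate 6 ["eyes1"] ++ [[]]

def get_yes_alt (length : Int) (eyes : Bool) (mouth : Bool) : List (List String) :=
  (PySem.List.pyRange 0 length 1).map (fun i =>
    ["main", "sleeve", "bottom"]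
      ++ (if mouth then PySem.List.pyGetD mouthPat (PySem.Int.mod i 36) [] else [])
      ++ (if eyes then PySem.List.pyGetD eyePat (PySem.Int.mod i 91) [] else []))

-- ===== PRECONDITION & SPEC =====
def Spec_get_yes (length : Int) (eyes : Bool) (mouth : Bool) (out : List (List String)) : Prop := out = get_yes_alt length eyes mouth
instance (length : Int) (eyes : Bool) (mouth : Bool) (out : List (List String)) : Decidable (Spec_get_yes length eyes mouth out) := by unfold Spec_get_yes; infer_instance

-- ===== CLAIM (what is proved, stated in full; the proofs are below) =====
def Claim_equal_get_yes : Prop := ∀ (length : Int) (eyes : Bool) (mouth : Bool), Dom_get_yes length eyes mouth → Spec_get_yes length eyes mouth (get_yes length eyes mouth)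

-- ===== LEMMAS AND PROOFS =====

-- B's frame at phases (m, e), with the table lookups on Nat indices.
def frameB (eyes mouth : Bool) (m e : Nat) : List String :=
  ["main", "sleeve", "bottom"]
    ++ (if mouth then mouthPat.getD m [] else [])
    ++ (if eyes then eyePat.getD e [] else [])

-- A's if-chain equals the mouth table at every in-period phase.
theorem mouth_table : ∀ m : Nat, m < 36 →
    (if m < 8 then ([] : List String)
     else if m < 17 then ["mouth1"]
     else if m < 26 then ["mouth2"]
     else if m < 35 then ["mouth1"]
     else []) = mouthPat.getD m [] := by decide

theorem eye_table : ∀ e : Nat, e < 91 →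
    (if e < 72 then ([] : List String)
     else if e < 78 then ["eyes1"]
     else if e < 84 then ["eyes2"]
     else if e < 90 then ["eyes1"]
     else []) = eyePat.getD e [] := by decide

-- Loop invariant: starting from in-period counters, A's loop produces B's frames
-- at the modularly advanced phases.
theorem get_yes_loop_eq (eyes mouth : Bool) :
    ∀ (n mc ec : Nat), mc < 36 → ec < 91 →
      get_yes_loop eyes mouth n mc ec
        = (List.range n).map (fun k => frameB eyes mouth ((mc + k) % 36) ((ec + k) % 91)) := by
  intro n
  induction n with
  | zero => intro mc ec _ _; simp [get_yes_loop]
  | succ n ih =>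
    intro mc ec hm he
    rw [List.range_succ_eq_map, List.map_cons, List.map_map]
    show get_yes_loop eyes mouth (n+1) mc ec = _
    rw [get_yes_loop]
    have hhead :
        (let cf0 : List String := ["main", "sleeve", "bottom"]
         let cf1 : List String :=
           if mouth then
             cf0 ++ (if mc < 8 then [] else if mc < 17 then ["mouth1"]
                     else if mc < 26 then ["mouth2"] else if mc < 35 then ["mouth1"] else [])
           else cf0
         let cf2 : List String :=
           if eyes then
             cf1 ++ (if ec < 72 then [] else if ec < 78 then ["eyes1"]
                     else if ec < 84 then ["eyes2"] else if ec < 90 then ["eyes1"] else [])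
           else cf1
         cf2) = frameB eyes mouth ((mc + 0) % 36) ((ec + 0) % 91) := by
      simp only [Nat.add_zero, Nat.mod_eq_of_lt hm, Nat.mod_eq_of_lt he, frameB]
      cases mouth <;> cases eyes <;>
        simp [mouth_table mc hm, eye_table ec he]
    refine congrArg₂ List.cons hhead ?_
    have hmc' : (if mouth then (if mc + 1 > 35 then 0 else mc + 1) else mc) < 36 := by
      cases mouth <;> simp <;> first | omega | (split <;> omega)
    have hec' : (if eyes then (if ec + 1 > 90 then 0 else ec + 1) else ec) < 91 := by
      cases eyes <;> simp <;> first | omega | (split <;> omega)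
    rw [ih _ _ hmc' hec']
    apply List.map_congr_left
    intro k _
    have h1 : ((if 35 ≤ mc then 0 else mc + 1) + k) % 36 = (mc + (k + 1)) % 36 := by
      split <;> omega
    have h2 : ((if 90 ≤ ec then 0 else ec + 1) + k) % 91 = (ec + (k + 1)) % 91 := by
      split <;> omega
    cases mouth <;> cases eyes <;> simp [frameB, Function.comp, h1, h2]

-- ===== VERDICT (by name: the statement is the Claim_ definition above) =====
theorem get_yes_spec : Claim_equal_get_yes := by
  intro length eyes mouth _
  show get_yes length eyes mouth = get_yes_alt length eyes mouth
  rw [get_yes, get_yes_loop_eq eyes mouth length.toNat 0 0 (by omega) (by omega),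
      get_yes_alt, PySem.List.pyRange_one, List.map_map]
  have : (length - 0).toNat = length.toNat := by omega
  rw [this]
  apply List.map_congr_left
  intro k _
  simp only [Function.comp, zero_add, frameB]
  have hm : PySem.Int.mod (k : Int) 36 = ((k % 36 : Nat) : Int) := PySem.Int.mod_natCast k 36
  have he : PySem.Int.mod (k : Int) 91 = ((k % 91 : Nat) : Int) := PySem.Int.mod_natCast k 91
  rw [hm, he, PySem.List.pyGetD_natCast, PySem.List.pyGetD_natCast]
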